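-- pv_equiv track=rewrite | github.com/Abrar051/AI_Road | ConstraintSatisfaction.py | FollowConstraint
-- ===== SOURCE A (Python) =====
-- def FollowConstraint(list1, list2):
--     constraintDictionary = {}
--     for i in list1:  # running loop for list1
--         for j in list2:
--             if not i in constraintDictionary: # and j != constraintDictionary[i]:
--                 constraintDictionary[i] = j
--                 list2.remove(j)
--
--
--     return constraintDictionary
-- ===== SOURCE B (Python) =====
-- def FollowConstraint(list1, list2):
--     # Single pass: each not-yet-seen key of list1 consumes the next element of
--     # list2 via an index pointer; list2's consumed prefix is then deleted in
--     # place (same side effect on list2 as the original).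
--     result = {}
--     k = 0
--     n = len(list2)
--     for i in list1:
--         if k == n:
--             break
--         if i not in result:
--             result[i] = list2[k]
--             k += 1
--     del list2[:k]
--     return result
-- ===== Notes on version B (the rewrite author's own statement) =====
-- stated objective: faster
-- what changed: Replaces the nested scan over a mutated list2 (with list2.remove inside) by a single pass over list1 with an index pointer into an unmodified list2, deleting the consumed prefix once at the end.
import Mathlib
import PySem

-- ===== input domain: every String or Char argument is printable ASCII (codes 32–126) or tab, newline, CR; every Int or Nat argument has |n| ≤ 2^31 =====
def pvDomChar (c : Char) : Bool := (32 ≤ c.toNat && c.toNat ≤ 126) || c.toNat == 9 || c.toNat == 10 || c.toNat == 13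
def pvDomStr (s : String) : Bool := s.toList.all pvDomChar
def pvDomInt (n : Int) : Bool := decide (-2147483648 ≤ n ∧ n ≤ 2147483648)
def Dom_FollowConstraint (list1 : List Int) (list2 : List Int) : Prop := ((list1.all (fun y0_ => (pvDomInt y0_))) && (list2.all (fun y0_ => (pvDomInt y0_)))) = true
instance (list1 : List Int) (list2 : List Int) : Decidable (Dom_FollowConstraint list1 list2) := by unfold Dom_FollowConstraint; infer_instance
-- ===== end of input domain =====

-- B replaces A's nested scan (with list2.remove inside) by a single pass over list1 with an
-- index pointer into list2 (objective: faster). Both Pythons consume the same prefix of list2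
-- in place; the equivalence proved here is about the RETURN value.

-- ===== PORT A =====
-- Python's `for j in list2` iterates the LIVE list by index while `list2.remove(j)` shrinks it,
-- so the inner loop is modelled by an index `idx` into the current list `l`.
def pvAInner (i : Int) (d : PySem.Dict Int Int) (l : List Int) (idx : Nat) :
    PySem.Dict Int Int × List Int :=
  if h : idx < l.length then
    let j := l[idx]
    if d.contains i then
      pvAInner i d l (idx + 1)
    else
      -- list2.remove(j): j = l[idx] ∈ l, so remove? is some; getD [] is never the default
      pvAInner i (d.insert i j) ((PySem.List.remove? l j).getD []) (idx + 1)
  else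
    (d, l)
termination_by l.length - idx
decreasing_by
  · omega
  · have hm : l[idx] ∈ l := List.getElem_mem h
    have hr := PySem.List.remove?_eq_some_erase l l[idx] hm
    have hl := List.length_erase_of_mem hm
    simp only [hr, Option.getD_some]
    omega

def FollowConstraint (list1 : List Int) (list2 : List Int) : List (Int × Int) :=
  (list1.foldl (fun s i => pvAInner i s.1 s.2 0) (PySem.Dict.empty, list2)).1.items

-- ===== PORT B =====
-- the loop of Source B: index pointer k into (unmodified) list2, break when k = len(list2)
def pvBLoop (list2 : List Int) (n : Nat) : List Int → PySem.Dict Int Int → Nat → PySem.Dict Int Int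
  | [], d, _ => d
  | i :: rest, d, k =>
    if k = n then d            -- break
    else if d.contains i then pvBLoop list2 n rest d k
    else pvBLoop list2 n rest (d.insert i (list2.getD k 0)) (k + 1)   -- list2[k], k < n guaranteed

def FollowConstraint_alt (list1 : List Int) (list2 : List Int) : List (Int × Int) :=
  (pvBLoop list2 list2.length list1 PySem.Dict.empty 0).items

-- ===== PRECONDITION & SPEC =====
def Spec_FollowConstraint (list1 : List Int) (list2 : List Int) (out : List (Int × Int)) : Prop := out = FollowConstraint_alt list1 list2
instance (list1 : List Int) (list2 : List Int) (out : List (Int × Int)) : Decidable (Spec_FollowConstraint list1 list2 out) := by unfold Spec_FollowConstraint; infer_instance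

-- ===== CLAIM (what is proved, stated in full; the proofs are below) =====
def Claim_equal_FollowConstraint : Prop := ∀ (list1 : List Int) (list2 : List Int), Dom_FollowConstraint list1 list2 → Spec_FollowConstraint list1 list2 (FollowConstraint list1 list2)

-- ===== LEMMAS AND PROOFS =====

-- A's inner loop does nothing once i is a key
theorem pvAInner_of_contains (i : Int) (d : PySem.Dict Int Int) (l : List Int) (idx : Nat)
    (h : d.contains i = true) : pvAInner i d l idx = (d, l) := by
  fun_induction pvAInner i d l idx with
  | case1 d l idx hlt hc ih => exact ih h
  | case2 d l idx hlt j hc ih => exact absurd h hc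
  | case3 d l idx hlt => rfl

-- A's inner loop, on a fresh key, pairs it with the head of l and drops that head
theorem pvAInner_of_not_contains (i : Int) (d : PySem.Dict Int Int) (l : List Int)
    (h : d.contains i = false) :
    pvAInner i d l 0 = match l with
      | [] => (d, [])
      | j :: t => (d.insert i j, t) := by
  cases l with
  | nil => simp [pvAInner]
  | cons j t =>
    rw [pvAInner]
    simp only [List.length_cons, Nat.zero_lt_succ, dif_pos, List.getElem_cons_zero, h,
      Bool.false_eq_true, if_false, PySem.List.remove?_cons_self, Option.getD_some]
    exact pvAInner_of_contains i (d.insert i j) t 1 (PySem.Dict.contains_insert_self d i j)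

-- once list2 is exhausted, A's remaining steps leave the dict unchanged
theorem pvA_foldl_nil (list1 : List Int) (d : PySem.Dict Int Int) :
    list1.foldl (fun s i => pvAInner i s.1 s.2 0) (d, ([] : List Int)) = (d, []) := by
  induction list1 generalizing d with
  | nil => rfl
  | cons i rest ih =>
    simp only [List.foldl_cons]
    cases hc : d.contains i with
    | true => rw [pvAInner_of_contains i d [] 0 hc]; exact ih d
    | false => rw [pvAInner_of_not_contains i d [] hc]; exact ih d

-- main invariant: A's fold state (d, list2.drop k) tracks B's (d, k)
theorem pvAB_loop (list2 : List Int) (list1 : List Int) (d : PySem.Dict Int Int) (k : Nat)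
    (hk : k ≤ list2.length) :
    (list1.foldl (fun s i => pvAInner i s.1 s.2 0) (d, list2.drop k)).1
      = pvBLoop list2 list2.length list1 d k := by
  induction list1 generalizing d k with
  | nil => rfl
  | cons i rest ih =>
    simp only [List.foldl_cons, pvBLoop]
    by_cases hkn : k = list2.length
    · subst hkn
      simp only [List.drop_length]
      cases hc : d.contains i with
      | true =>
        rw [pvAInner_of_contains i d [] 0 hc, pvA_foldl_nil]
        simp
      | false =>
        rw [pvAInner_of_not_contains i d [] hc, pvA_foldl_nil]
        simp
    · have hklt : k < list2.length := by omega
      rw [if_neg hkn]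
      have hdrop : list2.drop k = list2[k] :: list2.drop (k + 1) :=
        List.drop_eq_getElem_cons hklt
      cases hc : d.contains i with
      | true =>
        rw [if_pos rfl, pvAInner_of_contains i d _ 0 hc, ih d k hk]
      | false =>
        simp only [Bool.false_eq_true, if_false]
        rw [pvAInner_of_not_contains i d _ hc, hdrop]
        have hgd : list2.getD k 0 = list2[k] := List.getD_eq_getElem list2 0 hklt
        rw [hgd]
        exact ih (d.insert i list2[k]) (k + 1) (by omega)

-- ===== VERDICT (by name: the statement is the Claim_ definition above) =====
theorem FollowConstraint_spec : Claim_equal_FollowConstraint := by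
  intro list1 list2 _
  unfold Spec_FollowConstraint FollowConstraint FollowConstraint_alt
  rw [← pvAB_loop list2 list1 PySem.Dict.empty 0 (Nat.zero_le _)]
  simp
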